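-- pv_equiv track=rewrite | github.com/ItamarMu/university-stuff | Introduction to CS - Python/HW2/skeleton2.py | altsum_digits
-- ===== SOURCE A (Python) =====
-- def altsum_digits(n, d):
--     sN=str(n)
--     firstOne=sN[:d]
--     maxAlSum=0
--     cnt=0
--     for dig in firstOne:
--         maxAlSum+=int(dig)*((-1)**cnt)
--         cnt+=1
--     lastAlSum=maxAlSum
--     cnt=0
--     newAlSum=0
--     for dig in sN[d:]:
--         newAlSum=int(dig)*((-1)**(d+1))-lastAlSum+int(sN[cnt])
--         if newAlSum>maxAlSum:
--             maxAlSum=newAlSum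
--         lastAlSum=newAlSum
--         cnt+=1
--     return maxAlSum
-- ===== SOURCE B (Python) =====
-- def altsum_digits(n, d):
--     digits = [int(c) for c in str(n)]
--     L = len(digits)
--
--     def alt(k):
--         return sum(v * (-1) ** i for i, v in enumerate(digits[k:k + d]))
--
--     best = alt(0)
--     for k in range(1, max(1, L - d + 1)):
--         s = alt(k)
--         if s > best:
--             best = s
--     return best
-- ===== Notes on version B (the rewrite author's own statement) =====
-- stated objective: alternative
-- what changed: B recomputes each window's alternating digit sum independently from the slice digits[k:k+d] and takes the running maximum, instead of A's O(1) incremental sliding update of the previous window's sum.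
-- outside the precondition, e.g. on altsum_digits(12345, -1): A returns 8, B returns 0; on altsum_digits(198, -2): A returns 10.0, B returns 9
import Mathlib
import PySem

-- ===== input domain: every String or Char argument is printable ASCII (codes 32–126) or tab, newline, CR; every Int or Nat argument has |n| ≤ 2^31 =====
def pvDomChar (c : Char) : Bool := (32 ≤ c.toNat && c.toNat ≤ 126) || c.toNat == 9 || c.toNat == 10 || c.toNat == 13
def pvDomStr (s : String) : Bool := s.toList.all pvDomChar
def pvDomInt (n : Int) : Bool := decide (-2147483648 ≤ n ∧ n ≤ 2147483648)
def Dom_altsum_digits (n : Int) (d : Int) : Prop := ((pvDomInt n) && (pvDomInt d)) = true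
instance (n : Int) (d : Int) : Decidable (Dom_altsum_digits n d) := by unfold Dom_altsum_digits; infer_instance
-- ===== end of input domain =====

-- B replaces A's incremental sliding-window update by an independent per-window
-- recomputation over slices (objective: alternative; same return value, no speed claim).

-- int(c) for a single character; exact on Pre_ inputs, where every character is a digit
def pvDigit (c : Char) : Int := (PySem.Int.ofStr? (String.ofList [c])).getD 0

-- ===== PORT A =====
-- second loop of A: state (maxAlSum, lastAlSum, cnt); sN[cnt] via getD, exact since cnt < len(sN) on Pre_ inputs
def pvALoop (sN : List Char) (d : Int) : List Char → Int → Int → Nat → Int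
  | [], maxA, _, _ => maxA
  | c :: rest, maxA, last, cnt =>
      pvALoop sN d rest
        (if pvDigit c * (-1 : Int) ^ (d + 1).toNat - last + pvDigit (sN.getD cnt '0') > maxA
         then pvDigit c * (-1 : Int) ^ (d + 1).toNat - last + pvDigit (sN.getD cnt '0') else maxA)
        (pvDigit c * (-1 : Int) ^ (d + 1).toNat - last + pvDigit (sN.getD cnt '0'))
        (cnt + 1)

def altsum_digits (n : Int) (d : Int) : Int :=
  let sN := (PySem.Int.toStr n).toList
  let firstOne := PySem.List.slice sN none (some d)
  let p := firstOne.foldl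
    (fun (st : Int × Nat) c => (st.1 + pvDigit c * (-1 : Int) ^ st.2, st.2 + 1)) (0, 0)
  pvALoop sN d (PySem.List.slice sN (some d) none) p.1 p.1 0

-- ===== PORT B =====
-- alt(k) of Source B: alternating sum of the slice digits[k:k+d] via enumerate
def pvBWin (digits : List Int) (k d : Int) : Int :=
  (PySem.List.enumerate (PySem.List.slice digits (some k) (some (k + d)))).foldl
    (fun acc iv => acc + iv.2 * (-1 : Int) ^ iv.1.toNat) 0

def altsum_digits_alt (n : Int) (d : Int) : Int :=
  let digits := (PySem.Int.toStr n).toList.map pvDigit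
  let L : Int := digits.length
  (PySem.List.pyRange 1 (max 1 (L - d + 1)) 1).foldl
    (fun best k => if pvBWin digits k d > best then pvBWin digits k d else best)
    (pvBWin digits 0 d)

-- ===== PRECONDITION & SPEC =====
-- Pre_ excludes n < 0 (A raises ValueError on int('-')) and d < 0, where Python's negative-slice
-- wraparound and float power (-1)**(d+1) make A's result (sometimes a float) an accident.
def Pre_altsum_digits (n : Int) (d : Int) : Prop := 0 ≤ n ∧ 0 ≤ d
instance (n : Int) (d : Int) : Decidable (Pre_altsum_digits n d) := by unfold Pre_altsum_digits; infer_instance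
def pvWitness_altsum_digits : Int × Int := (1234, 2)

def Spec_altsum_digits (n : Int) (d : Int) (out : Int) : Prop := out = altsum_digits_alt n d
instance (n : Int) (d : Int) (out : Int) : Decidable (Spec_altsum_digits n d out) := by unfold Spec_altsum_digits; infer_instance

-- ===== CLAIM (what is proved, stated in full; the proofs are below) =====
def Claim_equal_altsum_digits : Prop := ∀ (n : Int) (d : Int), Dom_altsum_digits n d → Pre_altsum_digits n d → Spec_altsum_digits n d (altsum_digits n d)

-- ===== LEMMAS AND PROOFS =====

-- alternating sum Σ l[i]·(-1)^i, in head-recursive form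
def pvAltS : List Int → Int
  | [] => 0
  | a :: l => a - pvAltS l

-- window value: alternating sum of the length-d' window starting at k
def pvW (ds : List Int) (d' k : Nat) : Int := pvAltS ((ds.drop k).take d')

lemma pvAltS_append (l : List Int) (x : Int) :
    pvAltS (l ++ [x]) = pvAltS l + (-1 : Int) ^ l.length * x := by
  induction l with
  | nil => simp [pvAltS]
  | cons a l ih => simp only [List.cons_append, pvAltS, ih, List.length_cons, pow_succ]; ring

lemma pvEnumFold (l : List Int) : ∀ (s : Int) (acc : Int), 0 ≤ s →
    (PySem.List.enumerate l s).foldl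
      (fun acc iv => acc + iv.2 * (-1 : Int) ^ iv.1.toNat) acc
      = acc + (-1 : Int) ^ s.toNat * pvAltS l := by
  induction l with
  | nil => intro s acc _; simp [PySem.List.enumerate_nil, pvAltS]
  | cons a l ih =>
      intro s acc hs
      rw [PySem.List.enumerate_cons, List.foldl_cons, ih (s + 1) _ (by omega)]
      have h1 : (s + 1).toNat = s.toNat + 1 := by omega
      rw [h1]
      simp only [pvAltS, pow_succ]
      ring

lemma pvFirstFold (cs : List Char) : ∀ (s : Int) (i : Nat),
    cs.foldl (fun (st : Int × Nat) c => (st.1 + pvDigit c * (-1 : Int) ^ st.2, st.2 + 1)) (s, i)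
      = (s + (-1 : Int) ^ i * pvAltS (cs.map pvDigit), i + cs.length) := by
  induction cs with
  | nil => intro s i; simp [pvAltS]
  | cons c cs ih =>
      intro s i
      rw [List.foldl_cons, ih]
      simp only [List.map_cons, pvAltS, List.length_cons, Prod.mk.injEq, pow_succ]
      refine ⟨by ring, by omega⟩

-- the sliding identity A's inner loop relies on
lemma pvW_slide (ds : List Int) (d' j : Nat) (h : j + d' < ds.length) :
    pvW ds d' (j + 1)
      = ds.getD (j + d') 0 * (-1 : Int) ^ (d' + 1) - pvW ds d' j + ds.getD j 0 := by
  have hj : j < ds.length := by omega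
  have hdropj : ds.drop j = ds[j] :: ds.drop (j + 1) := List.drop_eq_getElem_cons hj
  rw [List.getD_eq_getElem ds 0 (by omega), List.getD_eq_getElem ds 0 hj]
  cases d' with
  | zero =>
      simp only [pvW, List.take_zero, pvAltS, Nat.add_zero]
      ring
  | succ e =>
      have hlen : e < (ds.drop (j + 1)).length := by simp [List.length_drop]; omega
      have htake : (ds.drop (j + 1)).take (e + 1)
          = (ds.drop (j + 1)).take e ++ [(ds.drop (j + 1))[e]] := by
        rw [List.take_add_one]
        simp [List.getElem?_eq_getElem hlen]
      have hget : (ds.drop (j + 1))[e] = ds[j + 1 + e] := by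
        simp [List.getElem_drop]
      have hlentake : ((ds.drop (j + 1)).take e).length = e := by
        simp [List.length_take, List.length_drop]; omega
      have hWj : pvW ds (e + 1) j = ds[j] - pvAltS ((ds.drop (j + 1)).take e) := by
        rw [pvW, hdropj, List.take_succ_cons, pvAltS]
      have hW1 : pvW ds (e + 1) (j + 1)
          = pvAltS ((ds.drop (j + 1)).take e) + (-1 : Int) ^ e * ds[j + 1 + e] := by
        rw [pvW, htake, pvAltS_append, hlentake, hget]
      have hidx : ds[j + (e + 1)] = ds[j + 1 + e] := by congr 1; omega
      rw [hW1, hWj, hidx, pow_succ, pow_succ]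
      ring

-- A's second loop computes the fold of max-updates over the window values at j+1, j+2, …
lemma pvALoop_spec (sN : List Char) (d : Int) (hd : 0 ≤ d) :
    ∀ (tail : List Char) (j : Nat) (acc : Int),
    tail = sN.drop (d.toNat + j) →
    pvALoop sN d tail acc (pvW (sN.map pvDigit) d.toNat j) j
      = (List.range' (j + 1) tail.length).foldl
          (fun b k => if pvW (sN.map pvDigit) d.toNat k > b then pvW (sN.map pvDigit) d.toNat k else b) acc := by
  intro tail
  induction tail with
  | nil => intro j acc _; simp [pvALoop]
  | cons c rest ih =>
      intro j acc htail
      have hlt : d.toNat + j < sN.length := by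
        by_contra hge
        rw [List.drop_eq_nil_of_le (by omega)] at htail
        exact List.cons_ne_nil c rest htail
      have hdrop : sN.drop (d.toNat + j) = sN[d.toNat + j] :: sN.drop (d.toNat + j + 1) :=
        List.drop_eq_getElem_cons hlt
      have hcr : c :: rest = sN[d.toNat + j] :: sN.drop (d.toNat + j + 1) := htail.trans hdrop
      injection hcr with hc hr
      have hrest : rest = sN.drop (d.toNat + (j + 1)) := by rw [hr]; congr 1
      have hnew : pvDigit c * (-1 : Int) ^ (d + 1).toNat - pvW (sN.map pvDigit) d.toNat j
            + pvDigit (sN.getD j '0')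
          = pvW (sN.map pvDigit) d.toNat (j + 1) := by
        have hpow : (d + 1).toNat = d.toNat + 1 := by omega
        have hlm : (sN.map pvDigit).length = sN.length := by simp
        have h1 : pvDigit c = (sN.map pvDigit).getD (j + d.toNat) 0 := by
          rw [show j + d.toNat = d.toNat + j from by omega,
            List.getD_eq_getElem (sN.map pvDigit) 0 (by simp only [List.length_map]; omega),
            List.getElem_map, hc]
        have h2 : pvDigit (sN.getD j '0') = (sN.map pvDigit).getD j 0 := by
          rw [List.getD_eq_getElem sN '0' (by omega), List.getD_eq_getElem (sN.map pvDigit) 0 (by simp only [List.length_map]; omega)]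
          simp
        rw [hpow, h1, h2, pvW_slide (sN.map pvDigit) d.toNat j (by omega)]
      rw [pvALoop, hnew, ih (j + 1) _ hrest]
      rw [show (c :: rest).length = rest.length + 1 from rfl, List.range'_succ, List.foldl_cons]

-- Source B's alt(k) is the window value, for 0 ≤ k, 0 ≤ d
lemma pvBWin_eq_W (digits : List Int) (k d : Int) (hk : 0 ≤ k) (hd : 0 ≤ d) :
    pvBWin digits k d = pvW digits d.toNat k.toNat := by
  unfold pvBWin pvW
  rw [PySem.List.slice_toNat digits hk (by omega)]
  rw [show (k + d).toNat - k.toNat = d.toNat by omega]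
  rw [pvEnumFold _ 0 0 le_rfl]
  simp

theorem altsum_digits_spec : Claim_equal_altsum_digits := by
  intro n d _ hpre
  obtain ⟨hn, hd⟩ := hpre
  show altsum_digits n d = altsum_digits_alt n d
  simp only [altsum_digits, altsum_digits_alt]
  set sN := (PySem.Int.toStr n).toList with hsN
  set ds := sN.map pvDigit with hds
  set d' := d.toNat with hd'
  -- A's first loop computes the first window's alternating sum
  rw [PySem.List.slice_to sN hd, pvFirstFold (sN.take d') 0 0]
  have hmaptake : (sN.take d').map pvDigit = ds.take d' := by simp [hds, List.map_take]
  simp only [pow_zero, one_mul, zero_add, hmaptake]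
  have hW0 : pvAltS (ds.take d') = pvW ds d' 0 := by simp [pvW]
  rw [hW0]
  -- A's second loop
  rw [PySem.List.slice_from sN hd, pvALoop_spec sN d hd (sN.drop d') 0 (pvW ds d' 0) rfl]
  -- B's fold over window starts
  have hB0 : pvBWin ds 0 d = pvW ds d' 0 := by
    simpa using pvBWin_eq_W ds 0 d le_rfl hd
  rw [hB0, PySem.List.pyRange_one 1 (max 1 ((ds.length : Int) - d + 1)), List.foldl_map]
  have hlens : (sN.drop d').length = (max 1 ((ds.length : Int) - d + 1) - 1).toNat := by
    have hl : ds.length = sN.length := by simp [hds]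
    rw [List.length_drop, hl]
    omega
  rw [hlens, List.range'_eq_map_range, List.foldl_map]
  apply PySem.List.foldl_congr_mem
  intro b k hk
  have hkn : (0 : Int) ≤ 1 + (k : Int) := by positivity
  have hBk : pvBWin ds (1 + (k : Int)) d = pvW ds d' (1 + k) := by
    rw [pvBWin_eq_W ds (1 + (k : Int)) d hkn hd, show ((1 : Int) + (k : Int)).toNat = 1 + k by omega, hd']
  rw [hBk]
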